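-- pv_equiv track=rewrite | github.com/alinstaller/alinstaller | src/partition_lib.py | get_num_from_part
-- ===== SOURCE A (Python) =====
-- def get_num_from_part(name):
--     i = len(name)
--     if i == 0:
--         return 0
--     i -= 1
--     if not name[i].isdigit():
--         return 0
--     while i >= 0 and name[i].isdigit():
--         i -= 1
--     return int(name[i + 1:])
-- ===== SOURCE B (Python) =====
-- def get_num_from_part(name):
--     # take-while pass over the reversed character sequence: collect trailing digits
--     digits = []
--     for c in reversed(name):
--         if not c.isdigit():
--             break
--         digits.append(c)
--     if not digits:
--         return 0
--     digits.reverse()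
--     return int(''.join(digits))
-- ===== Notes on version B (the rewrite author's own statement) =====
-- stated objective: alternative
-- what changed: Replaces A's backward index while-loop and slice-then-int with a functional take-while pass over the reversed character sequence: the trailing digit characters are collected into a list (stopping at the first non-digit), then reversed, joined and converted with int(), 0 if none were collected.
import Mathlib
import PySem

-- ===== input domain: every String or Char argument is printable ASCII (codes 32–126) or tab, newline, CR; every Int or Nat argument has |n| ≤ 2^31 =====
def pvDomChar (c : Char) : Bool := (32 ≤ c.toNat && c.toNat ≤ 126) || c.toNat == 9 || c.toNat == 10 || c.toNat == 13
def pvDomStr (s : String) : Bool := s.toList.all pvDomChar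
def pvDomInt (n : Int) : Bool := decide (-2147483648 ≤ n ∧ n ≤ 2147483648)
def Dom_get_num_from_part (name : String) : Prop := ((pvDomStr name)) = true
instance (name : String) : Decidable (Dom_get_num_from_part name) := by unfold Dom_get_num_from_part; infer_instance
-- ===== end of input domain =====

-- B replaces A's backward index while-loop + slice + int by a take-while pass over the
-- reversed character sequence that collects the trailing digits, then reverses, joins
-- and converts them; equal on all inputs.

-- ===== PORT A =====
-- the Python while-loop 'while i >= 0 and name[i].isdigit(): i -= 1' started at index i;
-- returns the final i + 1 (the slice start), i.e. 0 when i runs off the front end.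
-- cs.getD i ' ' is name[i]: i stays in range throughout the loop, so the default is never read.
def pvAWhile (cs : List Char) (i : Nat) : Nat :=
  if PySem.Chars.isdigit (cs.getD i ' ') then
    if i = 0 then 0 else pvAWhile cs (i - 1)
  else i + 1

def get_num_from_part (name : String) : Int :=
  let cs := name.toList
  let i := cs.length
  if i = 0 then 0
  else
    let i := i - 1
    if !(PySem.Chars.isdigit (cs.getD i ' ')) then 0
    else
      -- int(name[i + 1:]); the slice start is ≥ 0, so name[i+1:] is drop; the slice is a
      -- non-empty run of chars accepted by isdigit, and on the ASCII domain int() cannot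
      -- raise there, so the .getD 0 default is never read on Dom.
      (PySem.Int.ofChars? (cs.drop (pvAWhile cs i))).getD 0

-- ===== PORT B =====
-- the Python 'for c in reversed(name): if not c.isdigit(): break; digits.append(c)':
-- structural recursion over the reversed char list, collecting until the first non-digit.
def pvCollect : List Char → List Char
  | [] => []
  | c :: rest => if !(PySem.Chars.isdigit c) then [] else c :: pvCollect rest

def get_num_from_part_alt (name : String) : Int :=
  let digits := pvCollect name.toList.reverse
  if digits = [] then 0
  else
    -- int(''.join(digits)) after digits.reverse(); the chars are accepted by isdigit, so
    -- on the ASCII domain int() cannot raise and the .getD 0 default is never read on Dom.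
    (PySem.Int.ofChars? digits.reverse).getD 0

-- ===== PRECONDITION & SPEC =====
def Spec_get_num_from_part (name : String) (out : Int) : Prop := out = get_num_from_part_alt name
instance (name : String) (out : Int) : Decidable (Spec_get_num_from_part name out) := by unfold Spec_get_num_from_part; infer_instance

-- ===== CLAIM (what is proved, stated in full; the proofs are below) =====
def Claim_equal_get_num_from_part : Prop := ∀ (name : String), Dom_get_num_from_part name → Spec_get_num_from_part name (get_num_from_part name)

-- ===== LEMMAS AND PROOFS =====

-- B's collecting loop is takeWhile isdigit
theorem pvCollect_eq_takeWhile (l : List Char) :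
    pvCollect l = l.takeWhile PySem.Chars.isdigit := by
  induction l with
  | nil => rfl
  | cons c rest ih =>
    rw [pvCollect, List.takeWhile_cons]
    by_cases h : PySem.Chars.isdigit c
    · simp [h, ih]
    · simp [h]

-- A's while-loop started at the last index lands on the length of the non-digit part
theorem pvAWhile_append (ds : List Char) (c : Char) (i : Nat) (h : i < ds.length) :
    pvAWhile (ds ++ [c]) i = pvAWhile ds i := by
  induction i using Nat.strong_induction_on with
  | _ i ih =>
    conv_lhs => rw [pvAWhile]
    conv_rhs => rw [pvAWhile]
    rw [List.getD_append _ _ _ _ h]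
    split
    · split
      · rfl
      · exact ih (i - 1) (by omega) (by omega)
    · rfl

theorem pvAWhile_main (cs : List Char) (h : cs ≠ []) :
    pvAWhile cs (cs.length - 1) = (cs.reverse.dropWhile PySem.Chars.isdigit).length := by
  induction cs using List.reverseRecOn with
  | nil => exact absurd rfl h
  | append_singleton ds c ih =>
    have hget : (ds ++ [c]).getD ds.length ' ' = c := by
      simp [List.getD]
    rw [show (ds ++ [c]).length - 1 = ds.length by simp]
    rw [pvAWhile, hget, List.reverse_append, List.reverse_singleton, List.singleton_append,
      List.dropWhile_cons]
    by_cases hd : PySem.Chars.isdigit c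
    · rw [if_pos hd, if_pos hd]
      rcases List.eq_nil_or_concat ds with hnil | ⟨_, _, hcons⟩
      · subst hnil; simp
      · have hlen : ds.length ≠ 0 := by subst hcons; simp
        rw [if_neg hlen, pvAWhile_append ds c (ds.length - 1) (by omega),
          ih (by subst hcons; simp)]
    · rw [if_neg hd, if_neg hd]
      simp

-- A's slice is exactly the reverse of the collected run
theorem pv_drop_eq_take_reverse (cs : List Char) :
    cs.drop ((cs.reverse.dropWhile PySem.Chars.isdigit).length)
      = (cs.reverse.takeWhile PySem.Chars.isdigit).reverse := by
  have h : cs = (cs.reverse.dropWhile PySem.Chars.isdigit).reverse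
      ++ (cs.reverse.takeWhile PySem.Chars.isdigit).reverse := by
    have := (List.takeWhile_append_dropWhile
      (p := PySem.Chars.isdigit) (l := cs.reverse))
    conv_rhs => rw [← List.reverse_append, this]
    simp
  calc cs.drop ((cs.reverse.dropWhile PySem.Chars.isdigit).length)
      = ((cs.reverse.dropWhile PySem.Chars.isdigit).reverse
          ++ (cs.reverse.takeWhile PySem.Chars.isdigit).reverse).drop
          ((cs.reverse.dropWhile PySem.Chars.isdigit).reverse.length) := by
        rw [← h, List.length_reverse]
    _ = (cs.reverse.takeWhile PySem.Chars.isdigit).reverse := List.drop_left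

-- ===== VERDICT (by name: the statement is the Claim_ definition above) =====
theorem get_num_from_part_spec : Claim_equal_get_num_from_part := by
  intro name _
  unfold Spec_get_num_from_part get_num_from_part get_num_from_part_alt
  set cs := name.toList with hcs
  rw [pvCollect_eq_takeWhile]
  by_cases h0 : cs.length = 0
  · have : cs = [] := List.eq_nil_of_length_eq_zero h0
    simp [this]
  · have hne : cs ≠ [] := by intro h; exact h0 (by simp [h])
    simp only [if_neg h0]
    have hlast : cs.getD (cs.length - 1) ' ' = cs.reverse.headD ' ' := by
      rcases List.eq_nil_or_concat cs with h | ⟨ds, c, h⟩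
      · exact absurd h hne
      · rw [h]
        simp [List.getD, List.concat_eq_append]
    obtain ⟨ds, c, hsplit⟩ : ∃ ds c, cs = ds ++ [c] := by
      rcases List.eq_nil_or_concat cs with h | ⟨ds, c, h⟩
      · exact absurd h hne
      · exact ⟨ds, c, by simpa [List.concat_eq_append] using h⟩
    have hrev : cs.reverse = c :: ds.reverse := by rw [hsplit]; simp
    have hheadc : cs.getD (cs.length - 1) ' ' = c := by rw [hlast, hrev]; rfl
    by_cases hd : PySem.Chars.isdigit c
    · simp only [hheadc, hd, Bool.not_true, Bool.false_eq_true, if_false]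
      rw [pvAWhile_main cs hne, pv_drop_eq_take_reverse cs]
      have ht : cs.reverse.takeWhile PySem.Chars.isdigit ≠ [] := by
        rw [hrev, List.takeWhile_cons, if_pos hd]
        simp
      rw [if_neg ht]
    · simp only [hheadc, hd, Bool.not_false, if_true]
      have ht : cs.reverse.takeWhile PySem.Chars.isdigit = [] := by
        rw [hrev, List.takeWhile_cons, if_neg hd]
      rw [if_pos ht]
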